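-- pv_equiv track=rewrite | github.com/BumpyClock/dotfiles | .ai_agents/skills/memories/scripts/memories.py | ordered_categories
-- ===== SOURCE A (Python) =====
-- DEFAULT_CATEGORIES = [
--     "architecture",
--     "preferences",
--     "workflow",
--     "tooling",
--     "domain",
--     "product",
-- ]
--
-- def ordered_categories(entries):
--     categories = list(entries.keys())
--     ordered = []
--     for category in DEFAULT_CATEGORIES:
--         if category in categories:
--             ordered.append(category)
--     for category in sorted(categories):
--         if category not in ordered:
--             ordered.append(category)
--     return ordered
-- ===== SOURCE B (Python) =====
-- DEFAULT_CATEGORIES = [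
--     "architecture",
--     "preferences",
--     "workflow",
--     "tooling",
--     "domain",
--     "product",
-- ]
--
--
-- def ordered_categories(entries):
--     rank = {c: i for i, c in enumerate(DEFAULT_CATEGORIES)}
--     fallback = len(DEFAULT_CATEGORIES)
--     return sorted(entries.keys(), key=lambda c: (rank.get(c, fallback), c))
-- ===== Notes on version B (the rewrite author's own statement) =====
-- stated objective: faster
-- what changed: Replaced A's two collection passes (scan DEFAULT_CATEGORIES filtering present keys, then scan sorted keys skipping ones already in the growing result list) by a single sorted() call over the keys with a composite (rank-in-defaults-or-fallback, name) key built from a rank dictionary.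
import Mathlib
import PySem

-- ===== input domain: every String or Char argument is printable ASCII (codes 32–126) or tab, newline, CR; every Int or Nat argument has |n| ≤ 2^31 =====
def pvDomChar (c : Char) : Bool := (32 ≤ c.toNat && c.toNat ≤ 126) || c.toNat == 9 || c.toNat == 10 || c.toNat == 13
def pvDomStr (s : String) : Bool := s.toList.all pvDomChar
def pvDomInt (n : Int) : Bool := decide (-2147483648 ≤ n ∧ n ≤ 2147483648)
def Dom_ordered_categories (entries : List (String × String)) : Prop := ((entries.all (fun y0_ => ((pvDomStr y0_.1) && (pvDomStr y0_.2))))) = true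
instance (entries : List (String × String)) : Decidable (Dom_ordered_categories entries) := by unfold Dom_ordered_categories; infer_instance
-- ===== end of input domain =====

-- B replaces A's two collection passes (with an O(n^2) membership test in the growing result) by one sorted() call with a composite (rank, name) key; objective: faster.

-- shared module constant of both Pythons
def DEFAULT_CATEGORIES : List String :=
  ["architecture", "preferences", "workflow", "tooling", "domain", "product"]

-- ===== PORT A =====
def ordered_categories (entries : List (String × String)) : List String :=
  -- list(entries.keys()): the dict's keys, first-occurrence order
  let categories := PySem.List.dedup (entries.map Prod.fst)
  let ordered := DEFAULT_CATEGORIES.foldl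
    (fun acc category => if categories.contains category then acc ++ [category] else acc) []
  (PySem.List.sorted categories (fun x => x)).foldl
    (fun acc category => if acc.contains category then acc else acc ++ [category]) ordered

-- ===== PORT B =====
def ordered_categories_alt (entries : List (String × String)) : List String :=
  let rank : PySem.Dict String Int :=
    (PySem.List.enumerate DEFAULT_CATEGORIES).foldl (fun d ic => d.insert ic.2 ic.1) PySem.Dict.empty
  let fallback : Int := DEFAULT_CATEGORIES.length
  PySem.List.sorted2 (PySem.List.dedup (entries.map Prod.fst))
    (fun c => rank.getD c fallback) (fun c => c)

-- ===== PRECONDITION & SPEC =====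
def Spec_ordered_categories (entries : List (String × String)) (out : List String) : Prop := out = ordered_categories_alt entries
instance (entries : List (String × String)) (out : List String) : Decidable (Spec_ordered_categories entries out) := by unfold Spec_ordered_categories; infer_instance

-- ===== CLAIM (what is proved, stated in full; the proofs are below) =====
def Claim_equal_ordered_categories : Prop := ∀ (entries : List (String × String)), Dom_ordered_categories entries → Spec_ordered_categories entries (ordered_categories entries)

-- ===== LEMMAS AND PROOFS =====

-- B's rank dictionary, as a closed term (proof-side abbreviation)
def pvRank : PySem.Dict String Int :=
  (PySem.List.enumerate DEFAULT_CATEGORIES).foldl (fun d ic => d.insert ic.2 ic.1) PySem.Dict.empty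

-- B's composite first key
def pvK1 (c : String) : Int := pvRank.getD c (DEFAULT_CATEGORIES.length : Int)

lemma pvK1_notin {c : String} (h : c ∉ DEFAULT_CATEGORIES) : pvK1 c = 6 := by
  have hk : pvRank.keys = DEFAULT_CATEGORIES := by decide
  have hn : pvRank.get? c = none := by
    rw [PySem.Dict.get?_eq_none_iff_not_mem_keys, hk]; exact h
  simp [pvK1, PySem.Dict.getD, hn, DEFAULT_CATEGORIES]

lemma pvK1_in {c : String} (h : c ∈ DEFAULT_CATEGORIES) : pvK1 c < 6 := by
  fin_cases h <;> decide

-- the strict "(rank, name) < (rank, name)" order B sorts by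
def pvRlt (a b : String) : Prop := pvK1 a < pvK1 b ∨ (pvK1 a = pvK1 b ∧ a < b)

-- the boolean comparator PySem.List.sorted2 uses for keys (pvK1 ·, ·)
def pvLt (k1 : String → Int) (a b : String) : Bool :=
  decide (k1 a < k1 b) || !decide (k1 b < k1 a) && decide (a < b)

lemma pvLt_trans {k1 : String → Int} {a b c : String}
    (h1 : pvLt k1 a b = true) (h2 : pvLt k1 b c = true) : pvLt k1 a c = true := by
  simp only [pvLt, Bool.or_eq_true, Bool.and_eq_true, Bool.not_eq_true', decide_eq_true_iff,
    decide_eq_false_iff_not, not_lt] at *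
  rcases h1 with h1 | ⟨h1, h1'⟩ <;> rcases h2 with h2 | ⟨h2, h2'⟩
  · exact Or.inl (h1.trans h2)
  · exact Or.inl (lt_of_lt_of_le h1 h2)
  · exact Or.inl (lt_of_le_of_lt h1 h2)
  · exact Or.inr ⟨h1.trans h2, h1'.trans h2'⟩

lemma pvLt_irrefl {k1 : String → Int} (a : String) : pvLt k1 a a = false := by
  simp [pvLt]

lemma pvLt_asymm {k1 : String → Int} {a b : String}
    (h : pvLt k1 a b = true) : pvLt k1 b a = false := by
  cases hba : pvLt k1 b a with
  | false => rfl
  | true => exact absurd (pvLt_trans h hba) (by simp [pvLt_irrefl])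

-- Rle: the reflexive total order "not strictly after"
def pvRle (k1 : String → Int) (a b : String) : Prop := pvLt k1 b a = false

lemma pvLt_eq_false_iff {k1 : String → Int} (a b : String) :
    pvLt k1 a b = false ↔ k1 b ≤ k1 a ∧ (k1 b < k1 a ∨ b ≤ a) := by
  simp only [pvLt, Bool.or_eq_false_iff, Bool.and_eq_false_iff, Bool.not_eq_false',
    decide_eq_false_iff_not, decide_eq_true_iff, not_lt]

lemma pvRle_antisymm {k1 : String → Int} {a b : String}
    (h1 : pvRle k1 a b) (h2 : pvRle k1 b a) : a = b := by
  rw [pvRle, pvLt_eq_false_iff] at h1 h2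
  rcases h1 with ⟨hab, h1⟩; rcases h2 with ⟨hba, h2⟩
  rcases h1 with h1 | h1
  · exact absurd h1 (not_lt.mpr hba)
  · rcases h2 with h2 | h2
    · exact absurd h2 (not_lt.mpr hab)
    · exact le_antisymm h1 h2

lemma insertBy_pairwise {k1 : String → Int} (x : String) :
    ∀ (l : List String), l.Pairwise (pvRle k1) →
      (PySem.List.insertBy (pvLt k1) x l).Pairwise (pvRle k1) := by
  intro l
  induction l with
  | nil => intro _; simp [PySem.List.insertBy, pvRle]
  | cons y ys ih =>
    intro hp
    rw [List.pairwise_cons] at hp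
    obtain ⟨hy, hys⟩ := hp
    show (if pvLt k1 x y = true then x :: y :: ys else y :: PySem.List.insertBy (pvLt k1) x ys).Pairwise (pvRle k1)
    split_ifs with hxy
    · refine List.pairwise_cons.mpr ⟨?_, List.pairwise_cons.mpr ⟨hy, hys⟩⟩
      intro z hz
      rcases List.mem_cons.mp hz with rfl | hz
      · exact pvLt_asymm hxy
      · -- z ∈ ys : if z were before x, transitivity with x before y contradicts Rle y z
        show pvLt k1 z x = false
        cases hzx : pvLt k1 z x with
        | false => rfl
        | true =>
          have hzy : pvLt k1 z y = true := pvLt_trans hzx hxy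
          have h2 : pvLt k1 z y = false := hy z hz
          exact absurd h2 (by simp [hzy])
    · refine List.pairwise_cons.mpr ⟨?_, ih hys⟩
      intro z hz
      rw [PySem.List.mem_insertBy] at hz
      rcases hz with rfl | hz
      · cases h : pvLt k1 z y with
        | false => exact h
        | true => exact absurd h (by simp [hxy])
      · exact hy z hz

lemma foldl_insertBy_pairwise {k1 : String → Int} :
    ∀ (xs acc : List String), acc.Pairwise (pvRle k1) →
      (xs.foldl (fun acc x => PySem.List.insertBy (pvLt k1) x acc) acc).Pairwise (pvRle k1) := by
  intro xs
  induction xs with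
  | nil => intro acc h; exact h
  | cons x t ih => intro acc h; exact ih _ (insertBy_pairwise x acc h)

-- characterisation of sorted2 with an injective composite key: any strictly increasing
-- rearrangement of xs IS sorted2 xs
lemma sorted2_eq_of_perm_of_pairwise (xs ys : List String) (k1 : String → Int)
    (hperm : ys.Perm xs)
    (hpw : ys.Pairwise (fun a b => k1 a < k1 b ∨ (k1 a = k1 b ∧ a < b))) :
    PySem.List.sorted2 xs k1 (fun x => x) false = ys := by
  have hdef : PySem.List.sorted2 xs k1 (fun x => x) false
      = xs.foldl (fun acc x => PySem.List.insertBy (pvLt k1) x acc) [] := rfl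
  have hs1 : (PySem.List.sorted2 xs k1 (fun x => x) false).Pairwise (pvRle k1) := by
    rw [hdef]; exact foldl_insertBy_pairwise xs [] (by simp)
  have hs2 : ys.Pairwise (pvRle k1) := by
    refine hpw.imp ?_
    intro a b h
    rw [pvRle, pvLt_eq_false_iff]
    rcases h with h | ⟨h, h'⟩
    · exact ⟨h.le, Or.inl h⟩
    · exact ⟨h.le, Or.inr h'.le⟩
  exact List.eq_of_perm_of_sorted
    (fun a b _ _ h1 h2 => pvRle_antisymm h1 h2) hs1 hs2
    ((PySem.List.sorted2_perm xs k1 (fun x => x) false).trans hperm.symm)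

-- A's second loop over a duplicate-free list appends exactly the elements not already collected
lemma foldl_append_if_not_mem :
    ∀ (l acc : List String), l.Nodup →
      l.foldl (fun acc c => if acc.contains c then acc else acc ++ [c]) acc
        = acc ++ l.filter (fun c => !acc.contains c) := by
  intro l
  induction l with
  | nil => intro acc _; simp
  | cons c t ih =>
    intro acc hnd
    rw [List.nodup_cons] at hnd
    obtain ⟨hc, ht⟩ := hnd
    rw [List.foldl_cons, List.filter_cons]
    by_cases h : acc.contains c = true
    · rw [if_pos h, ih acc ht]
      have hb : (!acc.contains c) = false := by rw [h]; rfl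
      rw [hb]
      simp
    · rw [if_neg h, ih (acc ++ [c]) ht]
      have hb : acc.contains c = false := by
        cases hx : acc.contains c with
        | false => rfl
        | true => exact absurd hx h
      have hfc : t.filter (fun x => !(acc ++ [c]).contains x)
          = t.filter (fun x => !acc.contains x) := by
        apply List.filter_congr
        intro x hx
        have hxc : x ≠ c := fun he => hc (he ▸ hx)
        simp [hxc]
      have hnm : c ∉ acc := by simpa [List.contains_iff_mem] using hb
      rw [hfc]
      simp [hnm]

lemma ordered_eq (entries : List (String × String)) :
    ordered_categories entries = ordered_categories_alt entries := by
  set ks := PySem.List.dedup (entries.map Prod.fst) with hks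
  have hknd : ks.Nodup := PySem.List.nodup_dedup _
  set sk := PySem.List.sorted ks (fun x => x) with hsk
  have hskperm : sk.Perm ks := PySem.List.sorted_perm ks (fun x => x) false
  have hsknd : sk.Nodup := hskperm.nodup_iff.mpr hknd
  have hskmem : ∀ x, x ∈ sk ↔ x ∈ ks := fun x => hskperm.mem_iff
  -- A's first loop: the present defaults, in default order
  set d1 := DEFAULT_CATEGORIES.filter (fun c => ks.contains c) with hd1
  have hloop1 : DEFAULT_CATEGORIES.foldl
      (fun acc c => if ks.contains c then acc ++ [c] else acc) [] = d1 := by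
    rw [hd1]
    have := PySem.List.foldl_append_if (fun c => ks.contains c) (fun c => c) DEFAULT_CATEGORIES []
    simpa using this
  -- A's second loop
  have hA : ordered_categories entries
      = d1 ++ sk.filter (fun c => !d1.contains c) := by
    show (PySem.List.sorted ks (fun x => x)).foldl
        (fun acc c => if acc.contains c then acc else acc ++ [c])
        (DEFAULT_CATEGORIES.foldl (fun acc c => if ks.contains c then acc ++ [c] else acc) []) = _
    rw [hloop1, ← hsk, foldl_append_if_not_mem sk d1 hsknd]
  -- for keys, membership in d1 is membership in DEFAULT_CATEGORIES
  have hfilter : sk.filter (fun c => !d1.contains c)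
      = sk.filter (fun c => !DEFAULT_CATEGORIES.contains c) := by
    apply List.filter_congr
    intro x hx
    have hxks : x ∈ ks := (hskmem x).mp hx
    simp [hd1, List.mem_filter, hxks]
  set p2 := sk.filter (fun c => !DEFAULT_CATEGORIES.contains c) with hp2
  set ys := d1 ++ p2 with hys
  -- the assembled list is a permutation of the keys
  have hd1nd : d1.Nodup := List.Nodup.filter _ (by decide)
  have hperm : ys.Perm ks := by
    have hsplit : (sk.filter (fun c => DEFAULT_CATEGORIES.contains c) ++ p2).Perm sk :=
      List.filter_append_perm _ sk
    have hmemeq : d1.Perm (sk.filter (fun c => DEFAULT_CATEGORIES.contains c)) := by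
      rw [List.perm_ext_iff_of_nodup hd1nd (List.Nodup.filter _ hsknd)]
      intro a
      simp only [hd1, List.mem_filter, List.contains_iff_mem, hskmem]
      tauto
    exact ((hmemeq.append_right p2).trans hsplit).trans hskperm
  -- the assembled list is strictly increasing in B's composite key
  have hDEFpw0 : DEFAULT_CATEGORIES.Pairwise
      (fun a b => pvK1 a < pvK1 b ∨ (pvK1 a = pvK1 b ∧ a < b)) := by decide
  have hDEFpw : DEFAULT_CATEGORIES.Pairwise pvRlt := hDEFpw0
  have hd1pw : d1.Pairwise pvRlt := hDEFpw.sublist List.filter_sublist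
  have hp2pw : p2.Pairwise pvRlt := by
    have h1 : sk.Pairwise (fun a b : String => a ≤ b) := PySem.List.sorted_pairwise ks _
    have h2 : sk.Pairwise (fun a b : String => a ≠ b) := hsknd
    have h3 : p2.Pairwise (fun a b : String => a ≤ b ∧ a ≠ b) :=
      (h1.and h2).sublist List.filter_sublist
    refine List.Pairwise.imp_of_mem ?_ h3
    intro a b ha hb hab
    have hand : a ∉ DEFAULT_CATEGORIES := by
      have := (List.mem_filter.mp (hp2 ▸ ha)).2
      simpa [List.contains_iff_mem] using this
    have hbnd : b ∉ DEFAULT_CATEGORIES := by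
      have := (List.mem_filter.mp (hp2 ▸ hb)).2
      simpa [List.contains_iff_mem] using this
    exact Or.inr ⟨by rw [pvK1_notin hand, pvK1_notin hbnd], lt_of_le_of_ne hab.1 hab.2⟩
  have hcross : ∀ a ∈ d1, ∀ b ∈ p2, pvRlt a b := by
    intro a ha b hb
    have had : a ∈ DEFAULT_CATEGORIES := (List.mem_filter.mp (hd1 ▸ ha)).1
    have hbnd : b ∉ DEFAULT_CATEGORIES := by
      have := (List.mem_filter.mp (hp2 ▸ hb)).2
      simpa [List.contains_iff_mem] using this
    exact Or.inl (by rw [pvK1_notin hbnd]; exact pvK1_in had)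
  have hpw : ys.Pairwise pvRlt := List.pairwise_append.mpr ⟨hd1pw, hp2pw, hcross⟩
  -- conclude via the sorted2 characterisation
  have hB : ordered_categories_alt entries = PySem.List.sorted2 ks pvK1 (fun x => x) false := rfl
  rw [hA, hfilter, hB]
  exact (sorted2_eq_of_perm_of_pairwise ks ys pvK1 hperm (hpw.imp (fun h => h))).symm

-- ===== VERDICT (by name: the statement is the Claim_ definition above) =====
theorem ordered_categories_spec : Claim_equal_ordered_categories := by
  intro entries _
  show ordered_categories entries = ordered_categories_alt entries
  exact ordered_eq entries
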